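-- pv_equiv track=rewrite | github.com/Yowgf/8puzzle-solver | solver/_internal/utils/state.py | inverse_state_hash
-- ===== SOURCE A (Python) =====
-- def inverse_state_hash(h):
--     state = []
--     s = 0
--     i = 1
--     while s < h:
--         s = (h % (10 ** i))
--         digit = s // (10 ** (i - 1))
--         state.append(digit)
--         i += 1
--     if i < 10:
--         state.append(0)
--     return state
-- ===== SOURCE B (Python) =====
-- def inverse_state_hash(h):
--     if h <= 0:
--         return [0]
--     s = str(h)
--     digits = [int(c) for c in reversed(s)]
--     if len(s) <= 8:
--         digits.append(0)
--     return digits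
-- ===== Notes on version B (the rewrite author's own statement) =====
-- stated objective: idiomatic
-- what changed: B replaces A's while-loop peeling digits with modular arithmetic by a direct str(h) conversion: reversed string mapped to int digits, with the trailing 0 appended exactly when the decimal length is at most 8 (same condition as A's final i < 10 test), and an early return of [0] for h <= 0.
import Mathlib
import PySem

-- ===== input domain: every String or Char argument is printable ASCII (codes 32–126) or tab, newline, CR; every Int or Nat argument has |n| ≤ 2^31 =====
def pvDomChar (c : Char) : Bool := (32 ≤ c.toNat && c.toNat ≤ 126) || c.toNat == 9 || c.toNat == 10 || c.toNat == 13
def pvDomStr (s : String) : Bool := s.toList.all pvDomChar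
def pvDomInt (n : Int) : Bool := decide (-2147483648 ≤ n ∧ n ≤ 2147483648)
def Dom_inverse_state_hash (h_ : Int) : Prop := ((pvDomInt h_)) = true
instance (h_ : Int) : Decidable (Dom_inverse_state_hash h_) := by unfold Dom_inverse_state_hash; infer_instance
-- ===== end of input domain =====

-- B rewrites A's digit-peeling while-loop as an idiomatic str(h) conversion (reversed digits,
-- trailing 0 appended iff decimal length ≤ 8); equal return values on the whole domain.

-- ===== PORT A =====
-- A's while-loop; i is a local counter starting at 1 and only incremented, kept as a Nat so the
-- exponents 10**i / 10**(i-1) are Nat powers (exact: i ≥ 1 throughout).  fuel only makes the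
-- loop total; it is never exhausted on the stated domain (proved below).
def ishAWhile (h : Int) : Nat → List Int → Int → Nat → List Int × Nat
  | 0, state, _, i => (state, i)
  | fuel + 1, state, s, i =>
    if s < h then
      ishAWhile h fuel
        (state ++ [PySem.Int.floordiv (PySem.Int.mod h ((10 : Int) ^ i)) ((10 : Int) ^ (i - 1))])
        (PySem.Int.mod h ((10 : Int) ^ i)) (i + 1)
    else (state, i)

def inverse_state_hash (h_ : Int) : List Int :=
  let r := ishAWhile h_ 64 [] 0 1
  if r.2 < 10 then r.1 ++ [0] else r.1

-- ===== PORT B =====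
-- int(c) for a single decimal digit character (exact: every c of str(h) for h > 0 is '0'..'9')
def ishCharDigit (c : Char) : Int := (c.toNat : Int) - 48

def inverse_state_hash_alt (h_ : Int) : List Int :=
  if h_ ≤ 0 then [0]
  else
    let s := PySem.Int.toStr h_
    let digits := s.toList.reverse.map ishCharDigit
    if PySem.Str.len s ≤ 8 then digits ++ [0] else digits

-- ===== PRECONDITION & SPEC =====
def Spec_inverse_state_hash (h_ : Int) (out : List Int) : Prop := out = inverse_state_hash_alt h_
instance (h_ : Int) (out : List Int) : Decidable (Spec_inverse_state_hash h_ out) := by unfold Spec_inverse_state_hash; infer_instance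

-- ===== CLAIM (what is proved, stated in full; the proofs are below) =====
def Claim_equal_inverse_state_hash : Prop := ∀ (h_ : Int), Dom_inverse_state_hash h_ → Spec_inverse_state_hash h_ (inverse_state_hash h_)

-- ===== LEMMAS AND PROOFS =====

-- little-endian decimal digits of a natural number (reference object for both ports)
def dLE (n : Nat) : List Nat :=
  if h : n = 0 then [] else (n % 10) :: dLE (n / 10)
decreasing_by exact Nat.div_lt_self (Nat.pos_of_ne_zero h) (by norm_num)

lemma dLE_zero : dLE 0 = [] := by simp [dLE]

lemma dLE_pos {n : Nat} (h : n ≠ 0) : dLE n = (n % 10) :: dLE (n / 10) := by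
  rw [dLE]; simp [h]

lemma dLE_len_le : ∀ (k n : Nat), n < 10 ^ k → (dLE n).length ≤ k := by
  intro k
  induction k with
  | zero => intro n hn; interval_cases n; simp [dLE_zero]
  | succ k ih =>
    intro n hn
    by_cases h0 : n = 0
    · simp [h0, dLE_zero]
    · rw [dLE_pos h0]
      have : n / 10 < 10 ^ k := by
        rw [Nat.div_lt_iff_lt_mul (by norm_num)]
        calc n < 10 ^ (k + 1) := hn
        _ = 10 ^ k * 10 := by ring
      simpa using Nat.succ_le_succ (ih _ this)

lemma dLE_mem_lt : ∀ (n d : Nat), d ∈ dLE n → d < 10 := by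
  intro n
  induction n using Nat.strong_induction_on with
  | _ n ih =>
    intro d h
    by_cases h0 : n = 0
    · simp [h0, dLE_zero] at h
    · rw [dLE_pos h0] at h
      rcases List.mem_cons.mp h with h | h
      · subst h; exact Nat.mod_lt _ (by norm_num)
      · exact ih (n / 10) (Nat.div_lt_self (Nat.pos_of_ne_zero h0) (by norm_num)) d h

lemma pow_ten_succ (i : Nat) (hi : 1 ≤ i) : 10 ^ i = 10 ^ (i - 1) * 10 := by
  rw [← pow_succ]; congr 1; omega

-- A's loop, characterised: starting at position i with s = n % 10^(i-1), it appends exactly the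
-- digits of n / 10^(i-1) (little-endian) and advances i by their number.
lemma loopA_eq : ∀ (fuel : Nat) (n : Nat) (i : Nat) (state : List Int),
    0 < n → 1 ≤ i → (dLE (n / 10 ^ (i - 1))).length ≤ fuel →
    ishAWhile (n : Int) fuel state ((n % 10 ^ (i - 1) : Nat) : Int) i
      = (state ++ (dLE (n / 10 ^ (i - 1))).map (fun d : Nat => (d : Int)),
         i + (dLE (n / 10 ^ (i - 1))).length) := by
  intro fuel
  induction fuel with
  | zero =>
    intro n i state hn hi hf
    have hlen : (dLE (n / 10 ^ (i - 1))).length = 0 := Nat.le_zero.mp hf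
    have hq : n / 10 ^ (i - 1) = 0 := by
      by_contra hq
      rw [dLE_pos hq] at hlen; simp at hlen
    have hmod : n % 10 ^ (i - 1) = n := Nat.mod_eq_of_lt (Nat.lt_of_div_eq_zero (by positivity) hq)
    rw [ishAWhile]
    simp [hq, dLE_zero]
  | succ fuel ih =>
    intro n i state hn hi hf
    rw [ishAWhile]
    by_cases hq : n / 10 ^ (i - 1) = 0
    · -- loop exits: s = n % 10^(i-1) = n, which is not < n
      have hmod : n % 10 ^ (i - 1) = n := Nat.mod_eq_of_lt (Nat.lt_of_div_eq_zero (by positivity) hq)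
      simp [hq, dLE_zero, hmod]
    · -- loop continues: s = n % 10^(i-1) < n since 10^(i-1) ≤ n
      have hple : 10 ^ (i - 1) ≤ n := by
        by_contra hlt
        exact hq (Nat.div_eq_of_lt (by omega))
      have hm : n % 10 ^ (i - 1) < 10 ^ (i - 1) := Nat.mod_lt _ (by positivity)
      have hcond : ((n % 10 ^ (i - 1) : Nat) : Int) < (n : Int) := by exact_mod_cast by omega
      rw [if_pos hcond]
      have hpow : ((10 : Int) ^ i) = ((10 ^ i : Nat) : Int) := by push_cast; ring
      have hpow' : ((10 : Int) ^ (i - 1)) = ((10 ^ (i - 1) : Nat) : Int) := by push_cast; ring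
      have hmodc : PySem.Int.mod (n : Int) ((10 : Int) ^ i) = ((n % 10 ^ i : Nat) : Int) := by
        rw [hpow]; exact_mod_cast PySem.Int.mod_natCast n (10 ^ i)
      have hdivc : PySem.Int.floordiv ((n % 10 ^ i : Nat) : Int) ((10 : Int) ^ (i - 1))
          = ((n % 10 ^ i / 10 ^ (i - 1) : Nat) : Int) := by
        rw [hpow']; exact_mod_cast PySem.Int.floordiv_natCast (n % 10 ^ i) (10 ^ (i - 1))
      have hdigit : n % 10 ^ i / 10 ^ (i - 1) = n / 10 ^ (i - 1) % 10 := by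
        rw [pow_ten_succ i hi, Nat.mod_mul_right_div_self]
      have hnext : n % 10 ^ i = n % 10 ^ ((i + 1) - 1) := by simp
      have hdq : n / 10 ^ i = (n / 10 ^ (i - 1)) / 10 := by
        rw [pow_ten_succ i hi, Nat.div_div_eq_div_mul]
      have hdle : dLE (n / 10 ^ (i - 1)) = (n / 10 ^ (i - 1) % 10) :: dLE (n / 10 ^ i) := by
        rw [dLE_pos hq, hdq]
      have hflen : (dLE (n / 10 ^ ((i + 1) - 1))).length ≤ fuel := by
        have h2 : (dLE (n / 10 ^ (i - 1))).length ≤ fuel + 1 := hf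
        rw [hdle] at h2
        simpa using h2
      rw [hmodc, hdivc]
      have hih := ih n (i + 1) (state ++ [((n % 10 ^ i / 10 ^ (i - 1) : Nat) : Int)]) hn (by omega) hflen
      simp only [Nat.add_sub_cancel] at hih
      rw [hih, hdigit, hdle]
      refine Prod.ext ?_ ?_
      · simp [List.append_assoc]
      · simp
        omega

-- Nat.toDigitsCore characterised by dLE
lemma toDigitsCore_eq : ∀ (fuel n : Nat) (ds : List Char), n ≠ 0 → n ≤ fuel →
    Nat.toDigitsCore 10 fuel n ds = ((dLE n).map Nat.digitChar).reverse ++ ds := by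
  intro fuel
  induction fuel with
  | zero => intro n ds h0 hf; omega
  | succ fuel ih =>
    intro n ds h0 hf
    rw [Nat.toDigitsCore]
    by_cases hq : n / 10 = 0
    · simp only [hq]
      rw [dLE_pos h0, hq, dLE_zero]
      simp
    · rw [if_neg hq]
      have hlt : n / 10 < n := Nat.div_lt_self (Nat.pos_of_ne_zero h0) (by norm_num)
      rw [ih (n / 10) _ hq (by omega), dLE_pos h0]
      simp

lemma charDigit_digitChar {d : Nat} (h : d < 10) :
    ishCharDigit (Nat.digitChar d) = (d : Int) := by
  interval_cases d <;> decide

lemma toChars_eq (n : Nat) (h0 : n ≠ 0) :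
    PySem.Int.toChars (n : Int) = ((dLE n).map Nat.digitChar).reverse := by
  have h1 : PySem.Int.toChars (n : Int) = Nat.toDigits 10 n := by
    simp [PySem.Int.toChars]
  rw [h1, Nat.toDigits, toDigitsCore_eq (n + 1) n [] h0 (by omega)]
  simp

-- B's digit list equals the reference digits
lemma alt_digits (n : Nat) (h0 : n ≠ 0) :
    (PySem.Int.toStr (n : Int)).toList.reverse.map ishCharDigit
      = (dLE n).map (fun d : Nat => (d : Int)) := by
  rw [PySem.Int.toList_toStr, toChars_eq n h0]
  rw [List.reverse_reverse, List.map_map]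
  exact List.map_congr_left (fun d hd => by simpa using charDigit_digitChar (dLE_mem_lt n d hd))

-- B's length test equals the reference digit count
lemma alt_len (n : Nat) (h0 : n ≠ 0) :
    PySem.Str.len (PySem.Int.toStr (n : Int)) = ((dLE n).length : Int) := by
  rw [PySem.Str.len_eq, PySem.Int.toList_toStr, toChars_eq n h0]
  simp

-- ===== VERDICT (by name: the statement is the Claim_ definition above) =====
theorem inverse_state_hash_spec : Claim_equal_inverse_state_hash := by
  intro h_ hdom
  unfold Spec_inverse_state_hash
  by_cases hle : h_ ≤ 0
  · -- loop body never entered (s = 0 is not < h); both return [0]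
    have hA : ishAWhile h_ 64 [] 0 1 = ([], 1) := by
      rw [show (64 : Nat) = 63 + 1 from rfl, ishAWhile, if_neg (by omega)]
    simp [inverse_state_hash, inverse_state_hash_alt, hA, hle]
  · -- h_ > 0
    obtain ⟨n, rfl⟩ : ∃ n : Nat, h_ = (n : Int) := ⟨h_.toNat, by omega⟩
    have h0 : n ≠ 0 := by omega
    have hd : -2147483648 ≤ (n : Int) ∧ (n : Int) ≤ 2147483648 := by
      simpa [Dom_inverse_state_hash, pvDomInt, decide_eq_true_iff] using hdom
    have hbound : n < 10 ^ 64 := by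
      have h1 : n ≤ 2147483648 := by exact_mod_cast hd.2
      calc n ≤ 2147483648 := h1
      _ < 10 ^ 64 := by norm_num
    have hflen : (dLE (n / 10 ^ (1 - 1))).length ≤ 64 := by
      simpa using dLE_len_le 64 n hbound
    have hA := loopA_eq 64 n 1 [] (Nat.pos_of_ne_zero h0) (le_refl 1) hflen
    norm_num at hA
    rw [inverse_state_hash, inverse_state_hash_alt, if_neg hle]
    rw [hA]
    simp only [alt_digits n h0, alt_len n h0]
    by_cases hlen : (dLE n).length ≤ 8
    · rw [if_pos (by omega : 1 + (dLE n).length < 10),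
          if_pos (by exact_mod_cast hlen : ((dLE n).length : Int) ≤ 8)]
    · rw [if_neg (by omega : ¬ 1 + (dLE n).length < 10),
          if_neg (by exact_mod_cast hlen : ¬ ((dLE n).length : Int) ≤ 8)]
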